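-- pv_equiv track=rewrite | github.com/changsub1/datavis | app.py | _tokens_match
-- ===== SOURCE A (Python) =====
-- def _tokens_match(tokens1: str, tokens2: str) -> bool:
--     """두 토큰 문자열이 매칭되는지 확인 (영어 또는 한글 중 하나라도 일치하면 True)"""
--     if not tokens1 or not tokens2:
--         return False
--
--     # "||"로 분리된 경우 (영어||한글 형식)
--     parts1 = tokens1.split("||")
--     parts2 = tokens2.split("||")
--
--     # 각 부분에서 하나라도 일치하면 매칭
--     for p1 in parts1:
--         for p2 in parts2:
--             if p1 and p2 and p1 == p2:
--                 return True
--
--     # 전체 토큰 문자열이 같으면 매칭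
--     if tokens1 == tokens2:
--         return True
--
--     return False
-- ===== SOURCE B (Python) =====
-- def _tokens_match(tokens1: str, tokens2: str) -> bool:
--     if not tokens1 or not tokens2:
--         return False
--     if tokens1 == tokens2:
--         return True
--     a = sorted(p for p in tokens1.split("||") if p)
--     b = sorted(p for p in tokens2.split("||") if p)
--     i = j = 0
--     while i < len(a) and j < len(b):
--         if a[i] == b[j]:
--             return True
--         if a[i] < b[j]:
--             i += 1
--         else:
--             j += 1
--     return False
-- ===== Notes on version B (the rewrite author's own statement) =====
-- stated objective: alternative
-- what changed: Replaces A's nested pairwise scan over the split parts with sort-then-scan: both nonempty part lists are sorted and a common element is detected by a two-pointer merge; the tokens1 == tokens2 fallback is kept.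
import Mathlib
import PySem

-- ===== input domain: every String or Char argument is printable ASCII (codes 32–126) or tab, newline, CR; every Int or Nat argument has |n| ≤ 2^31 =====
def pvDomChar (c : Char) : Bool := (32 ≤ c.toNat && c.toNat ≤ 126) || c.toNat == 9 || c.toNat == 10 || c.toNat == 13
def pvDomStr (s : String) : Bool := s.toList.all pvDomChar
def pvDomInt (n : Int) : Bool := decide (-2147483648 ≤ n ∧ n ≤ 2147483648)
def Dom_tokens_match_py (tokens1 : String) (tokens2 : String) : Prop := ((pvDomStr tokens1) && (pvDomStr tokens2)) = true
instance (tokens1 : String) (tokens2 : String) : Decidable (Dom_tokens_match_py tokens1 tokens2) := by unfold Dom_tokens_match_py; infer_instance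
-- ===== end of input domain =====

-- B replaces A's nested pairwise scan with sort-then-scan: both nonempty part lists are sorted and a
-- common element is found by a two-pointer merge; the tokens1 == tokens2 fallback is kept (alternative algorithm).

-- ===== PORT A =====
-- inner 'for p2 in parts2: if p1 and p2 and p1 == p2: return True'
def tmInner (p1 : String) : List String → Bool
  | [] => false
  | p2 :: rest => if p1 != "" && p2 != "" && p1 == p2 then true else tmInner p1 rest

-- outer 'for p1 in parts1: …'
def tmOuter : List String → List String → Bool
  | [], _ => false
  | p1 :: rest, parts2 => if tmInner p1 parts2 then true else tmOuter rest parts2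

def tokens_match_py (tokens1 : String) (tokens2 : String) : Bool :=
  if tokens1 = "" ∨ tokens2 = "" then false
  else
    let parts1 := (PySem.Str.split? tokens1 "||").getD []
    let parts2 := (PySem.Str.split? tokens2 "||").getD []
    if tmOuter parts1 parts2 then true
    else if tokens1 = tokens2 then true
    else false

-- ===== PORT B =====
-- the 'while i < len(a) and j < len(b)' two-pointer loop, as recursion on the two list suffixes
def pvMerge : List String → List String → Bool
  | [], _ => false
  | _, [] => false
  | x :: xs, y :: ys =>
    if x = y then true
    else if x < y then pvMerge xs (y :: ys)
    else pvMerge (x :: xs) ys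
  termination_by a b => a.length + b.length

def tokens_match_py_alt (tokens1 : String) (tokens2 : String) : Bool :=
  if tokens1 = "" ∨ tokens2 = "" then false
  else if tokens1 = tokens2 then true
  else
    let a := PySem.List.sorted (((PySem.Str.split? tokens1 "||").getD []).filter (fun p => p != "")) (fun p => p) false
    let b := PySem.List.sorted (((PySem.Str.split? tokens2 "||").getD []).filter (fun p => p != "")) (fun p => p) false
    pvMerge a b

-- ===== PRECONDITION & SPEC =====
def Spec_tokens_match_py (tokens1 : String) (tokens2 : String) (out : Bool) : Prop := out = tokens_match_py_alt tokens1 tokens2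
instance (tokens1 : String) (tokens2 : String) (out : Bool) : Decidable (Spec_tokens_match_py tokens1 tokens2 out) := by unfold Spec_tokens_match_py; infer_instance

-- ===== CLAIM (what is proved, stated in full; the proofs are below) =====
def Claim_equal_tokens_match_py : Prop := ∀ (tokens1 : String) (tokens2 : String), Dom_tokens_match_py tokens1 tokens2 → Spec_tokens_match_py tokens1 tokens2 (tokens_match_py tokens1 tokens2)

-- ===== LEMMAS AND PROOFS =====

theorem tmInner_eq_true_iff (p1 : String) (l : List String) :
    tmInner p1 l = true ↔ p1 ≠ "" ∧ ∃ p2 ∈ l, p2 ≠ "" ∧ p1 = p2 := by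
  induction l with
  | nil => simp [tmInner]
  | cons p2 rest ih =>
    simp only [tmInner]
    split
    · rename_i h
      simp only [Bool.and_eq_true, bne_iff_ne, beq_iff_eq] at h
      simp only [true_iff]
      exact ⟨h.1.1, p2, by simp, h.1.2, h.2⟩
    · rename_i h
      simp only [Bool.and_eq_true, bne_iff_ne, beq_iff_eq, not_and] at h
      rw [ih]
      constructor
      · rintro ⟨h1, p, hp, hne, he⟩; exact ⟨h1, p, by simp [hp], hne, he⟩
      · rintro ⟨h1, p, hp, hne, he⟩
        refine ⟨h1, ?_⟩
        rcases List.mem_cons.mp hp with rfl | hp'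
        · exact absurd he (h ⟨h1, hne⟩)
        · exact ⟨p, hp', hne, he⟩

theorem tmOuter_eq_true_iff (l1 l2 : List String) :
    tmOuter l1 l2 = true ↔ ∃ p, p ∈ l1 ∧ p ≠ "" ∧ ∃ p2 ∈ l2, p2 ≠ "" ∧ p = p2 := by
  induction l1 with
  | nil => simp [tmOuter]
  | cons p1 rest ih =>
    simp only [tmOuter]
    split
    · rename_i h
      rw [tmInner_eq_true_iff] at h
      simp only [true_iff]
      exact ⟨p1, by simp, h.1, h.2⟩
    · rename_i h
      rw [ih]
      constructor
      · rintro ⟨p, hp, rest'⟩; exact ⟨p, by simp [hp], rest'⟩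
      · rintro ⟨p, hp, hne, hex⟩
        rcases List.mem_cons.mp hp with rfl | hp'
        · exact absurd (tmInner_eq_true_iff p l2 |>.mpr ⟨hne, hex⟩) (by simpa using h)
        · exact ⟨p, hp', hne, hex⟩

-- the merge loop finds exactly the common elements, given both lists are sorted
theorem pvMerge_eq_true_iff (l1 l2 : List String)
    (h1 : l1.Pairwise (· ≤ ·)) (h2 : l2.Pairwise (· ≤ ·)) :
    pvMerge l1 l2 = true ↔ ∃ p, p ∈ l1 ∧ p ∈ l2 := by
  induction l1, l2 using pvMerge.induct with
  | case1 l2 => simp [pvMerge]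
  | case2 l1 h => cases l1 <;> simp_all [pvMerge]
  | case3 xs x ys =>
    refine ⟨fun _ => ⟨x, by simp, by simp⟩, fun _ => ?_⟩
    simp [pvMerge]
  | case4 x xs y ys hne hlt ih =>
    rw [List.pairwise_cons] at h1
    rw [pvMerge, if_neg hne, if_pos hlt, ih h1.2 h2]
    constructor
    · rintro ⟨p, hp1, hp2⟩; exact ⟨p, List.mem_cons_of_mem _ hp1, hp2⟩
    · rintro ⟨p, hp1, hp2⟩
      refine ⟨p, ?_, hp2⟩
      rcases List.mem_cons.mp hp1 with rfl | hp1'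
      · exfalso
        rcases List.mem_cons.mp hp2 with rfl | hp2'
        · exact hne rfl
        · have := (List.pairwise_cons.mp h2).1 p hp2'
          exact absurd hlt (not_lt.mpr this)
      · exact hp1'
  | case5 x xs y ys hne hnlt ih =>
    rw [List.pairwise_cons] at h2
    rw [pvMerge, if_neg hne, if_neg hnlt, ih h1 h2.2]
    have hyx : y < x := lt_of_le_of_ne (not_lt.mp hnlt) (fun h => hne h.symm)
    constructor
    · rintro ⟨p, hp1, hp2⟩; exact ⟨p, hp1, List.mem_cons_of_mem _ hp2⟩
    · rintro ⟨p, hp1, hp2⟩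
      refine ⟨p, hp1, ?_⟩
      rcases List.mem_cons.mp hp2 with rfl | hp2'
      · exfalso
        rcases List.mem_cons.mp hp1 with rfl | hp1'
        · exact hne rfl
        · have := (List.pairwise_cons.mp h1).1 p hp1'
          exact absurd hyx (not_lt.mpr this)
      · exact hp2'

-- B's merge over the two sorted filtered lists = 'some nonempty part is common to both splits'
theorem merge_sorted_iff (l1 l2 : List String) :
    pvMerge (PySem.List.sorted (l1.filter (fun p => p != "")) (fun p => p) false)
            (PySem.List.sorted (l2.filter (fun p => p != "")) (fun p => p) false) = true
    ↔ ∃ p, p ∈ l1 ∧ p ≠ "" ∧ p ∈ l2 := by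
  rw [pvMerge_eq_true_iff _ _ (PySem.List.sorted_pairwise _ _) (PySem.List.sorted_pairwise _ _)]
  constructor
  · rintro ⟨p, hp1, hp2⟩
    rw [PySem.List.mem_sorted, List.mem_filter] at hp1 hp2
    exact ⟨p, hp1.1, by simpa using hp1.2, hp2.1⟩
  · rintro ⟨p, hp1, hne, hp2⟩
    exact ⟨p, by rw [PySem.List.mem_sorted, List.mem_filter]; exact ⟨hp1, by simpa using hne⟩,
              by rw [PySem.List.mem_sorted, List.mem_filter]; exact ⟨hp2, by simpa using hne⟩⟩

-- ===== VERDICT (by name: the statement is the Claim_ definition above) =====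
theorem tokens_match_py_spec : Claim_equal_tokens_match_py := by
  intro t1 t2 _
  unfold Spec_tokens_match_py tokens_match_py tokens_match_py_alt
  split
  · rfl
  · simp only
    by_cases heq : t1 = t2
    · subst heq
      simp
    · simp only [if_neg heq]
      rw [Bool.eq_iff_iff, merge_sorted_iff]
      constructor
      · intro h
        split at h
        · rename_i ho
          rw [tmOuter_eq_true_iff] at ho
          obtain ⟨p, hp1, hne, p2, hp2, _, rfl⟩ := ho
          exact ⟨p, hp1, hne, hp2⟩
        · exact absurd h (by simp)
      · rintro ⟨p, hp1, hne, hp2⟩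
        have ho : tmOuter ((PySem.Str.split? t1 "||").getD []) ((PySem.Str.split? t2 "||").getD []) = true :=
          (tmOuter_eq_true_iff _ _).mpr ⟨p, hp1, hne, p, hp2, hne, rfl⟩
        simp [ho]
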